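-- pv_equiv track=rewrite | github.com/S3nna13/Aurelius | src/inference/structured_output_v2.py | _infer_json_state
-- ===== SOURCE A (Python) =====
-- def _infer_json_state(s: str) -> str:
--     """Infer current JSON grammar state from partial JSON string.
--
--     Returns: 'in_string', 'expect_value', 'after_value', or 'unknown'.
--     """
--     if not s.strip():
--         return "expect_value"
--
--     in_string = False
--     escape_next = False
--     last_non_space = ""
--
--     for ch in s:
--         if escape_next:
--             escape_next = False
--             continue
--         if ch == "\\" and in_string:
--             escape_next = True
--             continue
--         if ch == '"':
--             in_string = not in_string
--             last_non_space = ch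
--             continue
--         if in_string:
--             continue
--         if ch in ("{", "[", ":", ","):
--             last_non_space = ch
--         elif ch not in (" ", "\t", "\n", "\r"):
--             last_non_space = ch
--
--     if in_string:
--         return "in_string"
--     if last_non_space in (":", "[", "{", ",", ""):
--         return "expect_value"
--     if last_non_space in ('"', "}", "]") or last_non_space.isdigit():
--         return "after_value"
--     return "expect_value"
-- ===== SOURCE B (Python) =====
-- def _close_string(s, i):
--     """Return the index just past the closing quote of the string opened
--     before position i, or -1 if the string is unterminated."""
--     n = len(s)
--     while i < n:
--         c = s[i]
--         if c == '"':
--             return i + 1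
--         i += 2 if c == '\\' else 1  # a backslash escapes the next char
--     return -1
--
--
-- def _infer_json_state(s: str) -> str:
--     """Infer current JSON grammar state from partial JSON string.
--
--     Returns: 'in_string', 'expect_value', 'after_value', or 'unknown'.
--     """
--     # Build a reduced skeleton of the text: every closed string literal is
--     # collapsed to a single '\x00' placeholder, everything outside strings
--     # is kept verbatim.  An unterminated string means we are inside one.
--     out = []
--     i, n = 0, len(s)
--     while i < n:
--         c = s[i]
--         if c == '"':
--             j = _close_string(s, i + 1)
--             if j == -1:
--                 return "in_string"
--             out.append('\x00')
--             i = j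
--         else:
--             out.append(c)
--             i += 1
--     # Classify by the last significant character of the skeleton.
--     last = "".join(out).rstrip(" \t\n\r")[-1:]
--     if last and (last in ('\x00', '}', ']') or last.isdigit()):
--         return "after_value"
--     return "expect_value"
-- ===== Notes on version B (the rewrite author's own statement) =====
-- stated objective: alternative
-- what changed: Replaces the per-character three-variable FSM by a two-phase tokenizer: closed string literals are consumed wholesale (index jumps) into a reduced skeleton with placeholders, then the state is read off the skeleton's last significant character.
import Mathlib
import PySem

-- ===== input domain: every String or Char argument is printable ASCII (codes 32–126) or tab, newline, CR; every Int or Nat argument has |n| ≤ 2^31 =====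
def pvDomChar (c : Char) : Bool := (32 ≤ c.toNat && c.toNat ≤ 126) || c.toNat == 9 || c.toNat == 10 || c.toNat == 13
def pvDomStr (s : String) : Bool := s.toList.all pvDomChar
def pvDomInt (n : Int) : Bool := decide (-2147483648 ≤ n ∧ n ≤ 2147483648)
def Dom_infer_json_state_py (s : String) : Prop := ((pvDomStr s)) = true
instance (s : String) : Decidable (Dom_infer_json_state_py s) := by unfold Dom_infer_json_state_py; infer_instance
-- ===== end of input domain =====

-- B replaces A's per-character FSM by a two-phase tokenizer (consume closed string
-- literals wholesale into a reduced skeleton, then classify its last significant char);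
-- alternative decomposition, same cost, return values proved equal on the ASCII domain.


-- ===== PORT A =====
-- the for-loop over s with state (in_string, escape_next, last_non_space)
def pvALoop : List Char → Bool → Bool → String → Bool × String
  | [], inS, _esc, last => (inS, last)
  | ch :: rest, inS, esc, last =>
    if esc then pvALoop rest inS false last
    else if ch = '\\' && inS then pvALoop rest inS true last
    else if ch = '"' then pvALoop rest (!inS) esc "\""
    else if inS then pvALoop rest inS esc last
    else if ch = '{' ∨ ch = '[' ∨ ch = ':' ∨ ch = ',' then pvALoop rest inS esc (String.ofList [ch])
    else if ¬(ch = ' ' ∨ ch = '\t' ∨ ch = '\n' ∨ ch = '\r') then pvALoop rest inS esc (String.ofList [ch])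
    else pvALoop rest inS esc last

def infer_json_state_py (s : String) : String :=
  if PySem.Str.strip s = "" then "expect_value"
  else
    let r := pvALoop s.toList false false ""
    if r.1 then "in_string"
    else if r.2 = ":" ∨ r.2 = "[" ∨ r.2 = "{" ∨ r.2 = "," ∨ r.2 = "" then "expect_value"
    else if r.2 = "\"" ∨ r.2 = "}" ∨ r.2 = "]" ∨ PySem.Str.strIsdigit r.2 then "after_value"
    else "expect_value"

-- ===== PORT B =====
def pvWs (c : Char) : Bool := c = ' ' || c = '\t' || c = '\n' || c = '\r'

-- _close_string: scan past the opened string; backslash skips the next char (i += 2);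
-- returns the remaining characters after the closing quote, none = unterminated (-1).
def pvCloseString : List Char → Option (List Char)
  | [] => none
  | '"' :: rest => some rest
  | '\\' :: [] => none
  | '\\' :: _ :: rest => pvCloseString rest
  | _ :: rest => pvCloseString rest

-- needed by pvReduce's decreasing_by
theorem pvCloseString_length : ∀ (l r : List Char), pvCloseString l = some r → r.length < l.length := by
  intro l
  fun_induction pvCloseString l with
  | case1 => intro r h; exact absurd h (by simp)
  | case2 rest => intro r h; simp [pvCloseString] at h; subst h; simp
  | case3 => intro r h; exact absurd h (by simp [pvCloseString])
  | case4 x rest ih => intro r h; exact Nat.lt_trans (ih r h) (by simp)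
  | case5 c rest h1 h2 h3 ih => intro r h; exact Nat.lt_succ_of_lt (ih r h)

-- the main while-loop of B: build the reduced skeleton (closed strings → '\x00'),
-- none = early return "in_string" on an unterminated string
def pvReduce : List Char → Option (List Char)
  | [] => some []
  | '"' :: rest =>
    match h : pvCloseString rest with
    | some r => (pvReduce r).map (fun t => '\x00' :: t)
    | none => none
  | c :: rest => (pvReduce rest).map (fun t => c :: t)
termination_by l => l.length
decreasing_by
  · have := pvCloseString_length _ _ h; simp; omega
  · simp

def infer_json_state_py_alt (s : String) : String :=
  match pvReduce s.toList with
  | none => "in_string"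
  | some red =>
    -- '"".join(out).rstrip(" \t\n\r")[-1:]' : the last char not in the set, if any
    match (red.reverse.dropWhile pvWs).head? with
    | none => "expect_value"   -- last == ""
    | some c =>
      if c = '\x00' || c = '}' || c = ']' || PySem.Chars.isdigit c then "after_value"
      else "expect_value"

-- ===== PRECONDITION & SPEC =====
def Spec_infer_json_state_py (s : String) (out : String) : Prop := out = infer_json_state_py_alt s
instance (s : String) (out : String) : Decidable (Spec_infer_json_state_py s out) := by unfold Spec_infer_json_state_py; infer_instance

-- ===== CLAIM (what is proved, stated in full; the proofs are below) =====
def Claim_equal_infer_json_state_py : Prop := ∀ (s : String), Dom_infer_json_state_py s → Spec_infer_json_state_py s (infer_json_state_py s)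

-- ===== LEMMAS AND PROOFS =====

-- A's last_non_space value contributed by one skeleton character
def pvTr (c : Char) : String := if c = '\x00' then "\"" else String.ofList [c]

-- A's last_non_space after scanning a skeleton, starting from `last`
def pvRedLast : List Char → String → String
  | [], last => last
  | c :: r, last => pvRedLast r (if pvWs c then last else pvTr c)

-- while a closed string is being consumed, A's loop keeps in_string and lands after it with last = '"'
theorem pvALoop_close : ∀ (rest r : List Char), pvCloseString rest = some r →
    ∀ last, pvALoop rest true false last = pvALoop r false false "\"" := by
  intro rest
  fun_induction pvCloseString rest with
  | case1 => intro r h; exact absurd h (by simp)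
  | case2 rest => intro r h last; simp [pvCloseString] at h; subst h; simp [pvALoop]
  | case3 => intro r h; exact absurd h (by simp [pvCloseString])
  | case4 x rest ih => intro r h last; simpa [pvALoop] using ih r h last
  | case5 c rest h1 h2 h3 ih =>
      intro r h last
      have hc : ¬ c = '\\' := by
        intro e; cases rest with
        | nil => exact h2 e rfl
        | cons a t => exact h3 a t e rfl
      have hq : ¬ c = '"' := fun e => h1 e
      simpa [pvALoop, hq, hc] using ih r h last

-- on an unterminated string A's loop ends with in_string = true
theorem pvALoop_open : ∀ (rest : List Char), pvCloseString rest = none →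
    ∀ last, (pvALoop rest true false last).1 = true := by
  intro rest
  fun_induction pvCloseString rest with
  | case1 => intro _ last; simp [pvALoop]
  | case2 rest => intro h; exact absurd h (by simp [pvCloseString])
  | case3 => intro _ last; simp [pvALoop]
  | case4 x rest ih => intro h last; simpa [pvALoop] using ih h last
  | case5 c rest h1 h2 h3 ih =>
      intro h last
      have hc : ¬ c = '\\' := by
        intro e; cases rest with
        | nil => exact h2 e rfl
        | cons a t => exact h3 a t e rfl
      have hq : ¬ c = '"' := fun e => h1 e
      simpa [pvALoop, hq, hc] using ih h last

theorem pvCloseString_subset : ∀ (l r : List Char), pvCloseString l = some r → ∀ c ∈ r, c ∈ l := by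
  intro l
  fun_induction pvCloseString l with
  | case1 => intro r h; exact absurd h (by simp)
  | case2 rest => intro r h c hc; simp [pvCloseString] at h; subst h; simp [hc]
  | case3 => intro r h; exact absurd h (by simp [pvCloseString])
  | case4 x rest ih => intro r h c hc; simp [ih r h c hc]
  | case5 _ rest h1 h2 h3 ih => intro r h c hc; exact List.mem_cons_of_mem _ (ih r h c hc)

-- main invariant: A's loop result is determined by B's skeleton
theorem pvALoop_reduce : ∀ (n : Nat) (l : List Char), l.length ≤ n → (∀ c ∈ l, c ≠ '\x00') →
    ∀ last,
    (pvReduce l = none → (pvALoop l false false last).1 = true) ∧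
    (∀ red, pvReduce l = some red → pvALoop l false false last = (false, pvRedLast red last)) := by
  intro n
  induction n with
  | zero =>
    intro l hl _ last
    have hnil : l = [] := List.eq_nil_of_length_eq_zero (Nat.le_zero.mp hl)
    subst hnil
    refine ⟨fun h => by simp [pvReduce] at h, fun red h => ?_⟩
    simp [pvReduce] at h
    subst h
    simp [pvALoop, pvRedLast]
  | succ n ih =>
    intro l hl hD last
    cases l with
    | nil =>
      refine ⟨fun h => by simp [pvReduce] at h, fun red h => ?_⟩
      simp [pvReduce] at h
      subst h
      simp [pvALoop, pvRedLast]
    | cons c rest =>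
      by_cases hq : c = '"'
      · subst hq
        have hstep : pvALoop ('"' :: rest) false false last = pvALoop rest true false "\"" := by
          simp [pvALoop]
        cases hcs : pvCloseString rest with
        | none =>
          have hred : pvReduce ('"' :: rest) = none := by
            simp only [pvReduce]
            split <;> simp_all
          refine ⟨fun _ => ?_, fun red h => by rw [hred] at h; cases h⟩
          rw [hstep]
          exact pvALoop_open rest hcs _
        | some r =>
          have hr : r.length ≤ n := by
            have := pvCloseString_length rest r hcs
            simp at hl
            omega
          have hDr : ∀ x ∈ r, x ≠ '\x00' :=
            fun x hx => hD x (List.mem_cons_of_mem _ (pvCloseString_subset rest r hcs x hx))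
          have IH := ih r hr hDr "\""
          have hred : pvReduce ('"' :: rest) = (pvReduce r).map (fun t => '\x00' :: t) := by
            simp only [pvReduce]
            split <;> simp_all
          have hstep2 : pvALoop ('"' :: rest) false false last = pvALoop r false false "\"" := by
            rw [hstep, pvALoop_close rest r hcs]
          cases hpr : pvReduce r with
          | none =>
            refine ⟨fun _ => ?_, fun red h => ?_⟩
            · rw [hstep2]; exact IH.1 hpr
            · rw [hred, hpr] at h; cases h
          | some red' =>
            refine ⟨fun h => ?_, fun red h => ?_⟩
            · rw [hred, hpr] at h; cases h
            · rw [hred, hpr] at h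
              simp at h
              subst h
              rw [hstep2, IH.2 red' hpr]
              simp [pvRedLast, pvWs, pvTr]
      · have hstep : pvALoop (c :: rest) false false last
            = pvALoop rest false false (if pvWs c then last else String.ofList [c]) := by
          by_cases hw : pvWs c = true
          · have h2 : c = ' ' ∨ c = '\t' ∨ c = '\n' ∨ c = '\r' := by
              simp [pvWs] at hw; tauto
            have h1 : ¬(c = '{' ∨ c = '[' ∨ c = ':' ∨ c = ',') := by
              rintro (rfl | rfl | rfl | rfl) <;> simp [pvWs] at hw
            simp [pvALoop, hq, h1, h2, hw]
          · have h2 : ¬(c = ' ' ∨ c = '\t' ∨ c = '\n' ∨ c = '\r') := by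
              simp [pvWs] at hw; tauto
            simp only [pvALoop, hq, h2, hw]
            split <;> simp
        have hred : pvReduce (c :: rest) = (pvReduce rest).map (fun t => c :: t) := by
          simp [pvReduce, hq]
        have hDc : c ≠ '\x00' := hD c (List.mem_cons_self ..)
        have IH := ih rest (by simp at hl; omega)
          (fun x hx => hD x (List.mem_cons_of_mem _ hx)) (if pvWs c then last else String.ofList [c])
        cases hpr : pvReduce rest with
        | none =>
          refine ⟨fun _ => ?_, fun red h => ?_⟩
          · rw [hstep]; exact IH.1 hpr
          · rw [hred, hpr] at h; cases h
        | some red' =>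
          refine ⟨fun h => ?_, fun red h => ?_⟩
          · rw [hred, hpr] at h; cases h
          · rw [hred, hpr] at h
            simp at h
            subst h
            rw [hstep, IH.2 red' hpr]
            simp [pvRedLast, pvTr, hDc]

-- the skeleton's characters: placeholders, or non-quote characters of the input
theorem pvReduce_mem : ∀ (n : Nat) (l : List Char), l.length ≤ n →
    ∀ red, pvReduce l = some red → ∀ c ∈ red, c = '\x00' ∨ (c ∈ l ∧ c ≠ '"') := by
  intro n
  induction n with
  | zero =>
    intro l hl red h c hc
    have hnil : l = [] := List.eq_nil_of_length_eq_zero (Nat.le_zero.mp hl)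
    subst hnil
    simp [pvReduce] at h
    subst h
    simp at hc
  | succ n ih =>
    intro l hl red h c hc
    cases l with
    | nil =>
      simp [pvReduce] at h
      subst h
      simp at hc
    | cons a rest =>
      by_cases hq : a = '"'
      · subst hq
        cases hcs : pvCloseString rest with
        | none =>
          rw [show pvReduce ('"' :: rest) = none from by
            simp only [pvReduce]; split <;> simp_all] at h
          cases h
        | some r =>
          rw [show pvReduce ('"' :: rest) = (pvReduce r).map (fun t => '\x00' :: t) from by
            simp only [pvReduce]; split <;> simp_all] at h
          cases hpr : pvReduce r with
          | none => rw [hpr] at h; cases h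
          | some red' =>
            rw [hpr] at h
            simp at h
            subst h
            cases List.mem_cons.mp hc with
            | inl e => exact Or.inl e
            | inr hc' =>
              have hr : r.length ≤ n := by
                have := pvCloseString_length rest r hcs
                simp at hl
                omega
              rcases ih r hr red' hpr c hc' with e | ⟨hm, hne⟩
              · exact Or.inl e
              · exact Or.inr ⟨List.mem_cons_of_mem _ (pvCloseString_subset rest r hcs c hm), hne⟩
      · rw [show pvReduce (a :: rest) = (pvReduce rest).map (fun t => a :: t) from by
          simp [pvReduce, hq]] at h
        cases hpr : pvReduce rest with
        | none => rw [hpr] at h; cases h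
        | some red' =>
          rw [hpr] at h
          simp at h
          subst h
          cases List.mem_cons.mp hc with
          | inl e => exact Or.inr ⟨by simp [e], by simpa [e] using hq⟩
          | inr hc' =>
            rcases ih rest (by simp at hl; omega) red' hpr c hc' with e | ⟨hm, hne⟩
            · exact Or.inl e
            · exact Or.inr ⟨List.mem_cons_of_mem _ hm, hne⟩

-- pvRedLast reads off the last non-whitespace character of the skeleton
theorem pvRedLast_eq : ∀ (red : List Char) (last : String),
    pvRedLast red last =
      match (red.reverse.dropWhile pvWs).head? with
      | none => last
      | some c => pvTr c := by
  intro red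
  induction red with
  | nil => intro last; simp [pvRedLast]
  | cons c r ihr =>
    intro last
    simp only [pvRedLast, ihr, List.reverse_cons, List.dropWhile_append]
    by_cases he : (List.dropWhile pvWs r.reverse).isEmpty = true
    · have hnil : List.dropWhile pvWs r.reverse = [] := by simpa using he
      by_cases hw : pvWs c = true <;>
        simp [he, hnil, List.dropWhile, hw]
    · have hne : List.dropWhile pvWs r.reverse ≠ [] := by simpa using he
      simp [he, List.head?_append_of_ne_nil, hne]
      cases hh : (List.dropWhile pvWs r.reverse).head? with
      | none => exact absurd (List.head?_eq_none_iff.mp hh) hne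
      | some d => simp

-- the final classification chains agree on a single skeleton character
theorem pvClassify_eq : ∀ (c : Char), c ≠ '\x00' → c ≠ '"' →
    ((if pvTr c = ":" ∨ pvTr c = "[" ∨ pvTr c = "{" ∨ pvTr c = "," ∨ pvTr c = "" then "expect_value"
      else if pvTr c = "\"" ∨ pvTr c = "}" ∨ pvTr c = "]" ∨ PySem.Str.strIsdigit (pvTr c) then "after_value"
      else "expect_value") : String)
    = if c = '\x00' || c = '}' || c = ']' || PySem.Chars.isdigit c then "after_value" else "expect_value" := by
  intro c h0 hq
  have key : ∀ (t : String), (pvTr c = t) ↔ [c] = t.toList := by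
    intro t
    constructor
    · intro h
      simpa [pvTr, h0] using congrArg String.toList h
    · intro h
      rw [pvTr, if_neg h0, ← String.ofList_toList (s := t), ← h]
  have hdig : PySem.Str.strIsdigit (pvTr c) = PySem.Chars.isdigit c := by
    rw [pvTr, if_neg h0]
    simp [PySem.Str.strIsdigit, PySem.Chars.strIsdigit]
  simp only [key, hdig, h0, hq, PySem.Chars.isdigit,
    show (":" : String).toList = [':'] from by simp,
    show ("[" : String).toList = ['['] from by simp,
    show ("{" : String).toList = ['{'] from by simp,
    show ("," : String).toList = [','] from by simp,
    show ("" : String).toList = [] from by simp,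
    show ("\"" : String).toList = ['"'] from by simp,
    show ("}" : String).toList = ['}'] from by simp,
    show ("]" : String).toList = [']'] from by simp,
    List.cons.injEq, and_true, List.cons_ne_nil,
    Bool.or_eq_true, decide_eq_true_eq, Bool.and_eq_true]
  by_cases hset : c = ':' ∨ c = '[' ∨ c = '{' ∨ c = ','
  · rcases hset with rfl | rfl | rfl | rfl <;> decide
  · rw [if_neg (by simpa using hset)]
    by_cases h2 : c = '}' ∨ c = ']' ∨ ('0' ≤ c ∧ c ≤ '9')
    · rw [if_pos (by tauto), if_pos (by tauto)]
    · rw [if_neg (by tauto), if_neg (by tauto)]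

theorem strip_empty_all_space (s : String) (h : PySem.Str.strip s = "") :
    ∀ c ∈ s.toList, PySem.Chars.isspace c = true := by
  intro c hc
  have h1 : PySem.Chars.strip s.toList = [] := by
    simpa [PySem.Str.toList_strip] using congrArg String.toList h
  unfold PySem.Chars.strip PySem.Chars.rstrip PySem.Chars.lstrip at h1
  rw [List.reverse_eq_nil_iff, List.dropWhile_eq_nil_iff] at h1
  by_cases hm : c ∈ List.dropWhile PySem.Chars.isspace s.toList
  · exact h1 c (List.mem_reverse.mpr hm)
  · have hsplit := List.takeWhile_append_dropWhile
      (p := PySem.Chars.isspace) (l := s.toList)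
    have hct : c ∈ List.takeWhile PySem.Chars.isspace s.toList := by
      rcases List.mem_append.mp (by rw [hsplit]; exact hc) with h' | h'
      · exact h'
      · exact absurd h' hm
    exact List.mem_takeWhile_imp hct

theorem pvWs_of (c : Char)
    (h : c.toNat = 32 ∨ c.toNat = 9 ∨ c.toNat = 10 ∨ c.toNat = 13) : pvWs c = true := by
  rcases c with ⟨⟨⟨n, hn⟩⟩, hv⟩
  simp [Char.toNat] at h
  rcases h with rfl | rfl | rfl | rfl <;> rfl

theorem pvReduce_all_ws : ∀ l : List Char, (∀ c ∈ l, pvWs c = true) → pvReduce l = some l := by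
  intro l
  induction l with
  | nil => intro _; simp [pvReduce]
  | cons c rest ihr =>
    intro h
    have hq : c ≠ '"' := by
      intro e
      have := h c (List.mem_cons_self ..)
      rw [e] at this
      simp [pvWs] at this
    rw [show pvReduce (c :: rest) = (pvReduce rest).map (fun t => c :: t) from by
      simp [pvReduce, hq]]
    rw [ihr (fun x hx => h x (List.mem_cons_of_mem _ hx))]
    rfl

-- ===== VERDICT (by name: the statement is the Claim_ definition above) =====
theorem infer_json_state_py_spec : Claim_equal_infer_json_state_py := by
  intro s hDom
  show infer_json_state_py s = infer_json_state_py_alt s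
  have hDomC : ∀ c ∈ s.toList, pvDomChar c = true := by
    have := hDom
    unfold Dom_infer_json_state_py pvDomStr at this
    simpa [List.all_eq_true] using this
  have hD : ∀ c ∈ s.toList, c ≠ '\x00' := by
    intro c hc e
    have := hDomC c hc
    rw [e] at this
    simp [pvDomChar] at this
  by_cases hstrip : PySem.Str.strip s = ""
  · have hws : ∀ c ∈ s.toList, pvWs c = true := by
      intro c hc
      have hsp := strip_empty_all_space s hstrip c hc
      have hdc := hDomC c hc
      apply pvWs_of
      simp [PySem.Chars.isspace] at hsp
      simp [pvDomChar] at hdc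
      omega
    have hred : pvReduce s.toList = some s.toList := pvReduce_all_ws _ hws
    have hdrop : List.dropWhile pvWs s.toList.reverse = [] :=
      List.dropWhile_eq_nil_iff.mpr (fun x hx => hws x (List.mem_reverse.mp hx))
    simp [infer_json_state_py, infer_json_state_py_alt, hstrip, hred, hdrop]
  · have main := pvALoop_reduce s.toList.length s.toList le_rfl hD ""
    cases hred : pvReduce s.toList with
    | none =>
      have h1 : (pvALoop s.toList false false "").1 = true := main.1 hred
      simp [infer_json_state_py, infer_json_state_py_alt, hstrip, hred, h1]
    | some red =>
      have h2 := main.2 red hred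
      simp only [infer_json_state_py, infer_json_state_py_alt, hstrip, if_neg, hred, h2]
      rw [pvRedLast_eq]
      cases hh : (red.reverse.dropWhile pvWs).head? with
      | none => simp
      | some c =>
        have hcred : c ∈ red := by
          have h3 : c ∈ red.reverse.dropWhile pvWs := List.mem_of_mem_head? (by rw [hh]; rfl)
          exact List.mem_reverse.mp ((List.dropWhile_sublist _).mem h3)
        rcases pvReduce_mem s.toList.length s.toList le_rfl red hred c hcred with rfl | ⟨hm, hq⟩
        · simp only [pvTr, if_pos rfl]
          decide
        · have h0 : c ≠ '\x00' := hD c hm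
          simpa using pvClassify_eq c h0 hq
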